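-- pv_equiv track=rewrite | github.com/mohsinalimat/adaequare_gsp | adaequare_gsp/adaequare_gsp/doctype/purchase_reconciliation_tool/purchase_reconciliation_tool.py | get_comparable_bill_no
-- ===== SOURCE A (Python) =====
-- def get_comparable_bill_no(bill_no, fy):
--     fy = fy.split("-")
--     replace_list = [
--         f"{fy[0]}-{fy[1]}",
--         f"{fy[0]}/{fy[1]}",
--         f"{fy[0]}-{fy[1][2:]}",
--         f"{fy[0]}/{fy[1][2:]}",
--         f"{fy[0][2:]}-{fy[1][2:]}",
--         f"{fy[0][2:]}/{fy[1][2:]}",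
--         "/",  # these are only special characters allowed in invoice
--         "-",
--     ]
--
--     inv = bill_no
--     for replace in replace_list:
--         inv = inv.replace(replace, " ")
--     inv = " ".join(inv.split()).lstrip("0")
--     return inv
-- ===== SOURCE B (Python) =====
-- def get_comparable_bill_no(bill_no, fy):
--     parts = fy.split("-")
--     y0, y1 = parts[0], parts[1]
--     pats = [
--         y0 + "-" + y1,
--         y0 + "/" + y1,
--         y0 + "-" + y1[2:],
--         y0 + "/" + y1[2:],
--         y0[2:] + "-" + y1[2:],
--         y0[2:] + "/" + y1[2:],
--         "/",
--         "-",
--     ]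
--     # single left-to-right pass: at each position take the first pattern
--     # (in priority order) that matches and emit one space for it
--     out = []
--     i, n = 0, len(bill_no)
--     while i < n:
--         for p in pats:
--             if bill_no.startswith(p, i):
--                 out.append(" ")
--                 i += len(p)
--                 break
--         else:
--             out.append(bill_no[i])
--             i += 1
--     inv = "".join(out)
--     return " ".join(inv.split()).lstrip("0")
-- ===== Notes on version B (the rewrite author's own statement) =====
-- stated objective: alternative
-- what changed: B replaces A's eight sequential whole-string replace passes by a single left-to-right scan that at each position tries the eight patterns in priority order, emits one space for the first match and jumps over it (a hand-rolled equivalent of one regex alternation pass), then normalizes whitespace once.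
-- outside the precondition, e.g. on get_comparable_bill_no('B 1-21/2', ' 1-2'): A returns 'B', B returns 'B 1 2'; on get_comparable_bill_no('21-22021-2022', '2021-2022'): A returns '21 2', B returns '21 2022'
import Mathlib
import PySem

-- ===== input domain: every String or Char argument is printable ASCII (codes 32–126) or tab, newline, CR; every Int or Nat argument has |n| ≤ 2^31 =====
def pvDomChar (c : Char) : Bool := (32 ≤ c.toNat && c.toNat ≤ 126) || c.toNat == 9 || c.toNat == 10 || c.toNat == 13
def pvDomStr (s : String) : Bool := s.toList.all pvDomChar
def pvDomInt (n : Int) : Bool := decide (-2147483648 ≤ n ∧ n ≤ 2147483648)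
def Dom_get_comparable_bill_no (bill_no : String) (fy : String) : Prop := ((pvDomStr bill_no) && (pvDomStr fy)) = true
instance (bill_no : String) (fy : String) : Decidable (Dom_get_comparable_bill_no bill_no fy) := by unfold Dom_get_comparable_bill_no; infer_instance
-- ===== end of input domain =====

-- B replaces A's eight sequential whole-string replace passes by ONE left-to-right scan that at
-- each position takes the first matching pattern in priority order (a hand-rolled single
-- alternation pass); objective: alternative (same cost, one pass instead of eight).

-- ===== PORT A =====
-- Ported on the List Char side via PySem.Chars; lstrip("0") is ported by hand as
-- List.dropWhile (· == '0') — exact: Python's lstrip("0") drops exactly the leading '0' characters.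
def get_comparable_bill_no (bill_no : String) (fy : String) : String :=
  let fyl := PySem.Chars.splitOn fy.toList ['-']
  match PySem.List.pyGet? fyl 0, PySem.List.pyGet? fyl 1 with
  | some f0, some f1 =>
      let s0 := PySem.List.slice f0 (some 2) none      -- fy[0][2:]
      let s1 := PySem.List.slice f1 (some 2) none      -- fy[1][2:]
      let replace_list : List (List Char) :=
        [f0 ++ '-' :: f1, f0 ++ '/' :: f1, f0 ++ '-' :: s1, f0 ++ '/' :: s1,
         s0 ++ '-' :: s1, s0 ++ '/' :: s1, ['/'], ['-']]
      let inv := replace_list.foldl (fun inv r => PySem.Chars.replace inv r [' ']) bill_no.toList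
      String.ofList ((PySem.Chars.join [' '] (PySem.Chars.split₀ inv)).dropWhile (· == '0'))
  | _, _ => ""   -- fy.split("-")[1] raises IndexError here: excluded by Pre_

-- ===== PORT B =====
-- B's inner `for p in pats: if bill_no.startswith(p, i)` is the first pattern matching at the
-- current position: ported as List.find?.  The `while` loop over positions is pvScan below
-- (emit one ' ' per match and jump over it, else copy the character); ported by hand, exact.
-- The `!p.isEmpty` test only guards termination; the eight patterns are never empty.
def pvFind (ps : List (List Char)) (l : List Char) : Option (List Char) :=
  ps.find? (fun p => !p.isEmpty && p.isPrefixOf l)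

def pvScan (ps : List (List Char)) : List Char → List Char
  | [] => []
  | c :: t =>
      match h : pvFind ps (c :: t) with
      | some q => ' ' :: pvScan ps (List.drop q.length (c :: t))
      | none => c :: pvScan ps t
termination_by l => l.length
decreasing_by
  · have hq := List.find?_some h
    have : q.isEmpty = false := by
      cases hqe : q.isEmpty <;> simp_all
    have : 1 ≤ q.length := by
      cases q <;> simp_all [List.isEmpty]
    simp [List.length_drop]; omega
  · simp

def get_comparable_bill_no_alt (bill_no : String) (fy : String) : String :=
  let fyl := PySem.Chars.splitOn fy.toList ['-']
  match PySem.List.pyGet? fyl 0 with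
  | none => ""   -- parts[1] raises IndexError here: excluded by Pre_
  | some y0 =>
    match PySem.List.pyGet? fyl 1 with
    | none => ""   -- parts[1] raises IndexError here: excluded by Pre_
    | some y1 =>
      let s0 := PySem.List.slice y0 (some 2) none
      let s1 := PySem.List.slice y1 (some 2) none
      let pats : List (List Char) :=
        [y0 ++ '-' :: y1, y0 ++ '/' :: y1, y0 ++ '-' :: s1, y0 ++ '/' :: s1,
         s0 ++ '-' :: s1, s0 ++ '/' :: s1, ['/'], ['-']]
      let inv := pvScan pats bill_no.toList
      String.ofList ((PySem.Chars.join [' '] (PySem.Chars.split₀ inv)).dropWhile (· == '0'))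

-- ===== PRECONDITION & SPEC =====
-- pvOcc p s a: pattern p occurs in s at position a.
def pvOcc (p s : List Char) (a : Nat) : Prop := p.isPrefixOf (s.drop a) = true
-- pvCond p q s: no occurrence of q starts strictly before an overlapping occurrence of p.
def pvCond (p q s : List Char) : Prop :=
  ∀ a, a < s.length → ∀ b, b < s.length →
    pvOcc q s a → pvOcc p s b → a < b → a + q.length ≤ b
-- the eight patterns A derives from fy (same derivation as the programs)
def pvPats (fy : String) : List (List Char) :=
  let fyl := PySem.Chars.splitOn fy.toList ['-']
  let y0 := (PySem.List.pyGet? fyl 0).getD []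
  let y1 := (PySem.List.pyGet? fyl 1).getD []
  let s0 := PySem.List.slice y0 (some 2) none
  let s1 := PySem.List.slice y1 (some 2) none
  [y0 ++ '-' :: y1, y0 ++ '/' :: y1, y0 ++ '-' :: s1, y0 ++ '/' :: s1,
   s0 ++ '-' :: s1, s0 ++ '/' :: s1, ['/'], ['-']]

-- Pre_ excludes three kinds of inputs: fy without "-" (A raises IndexError at fy.split("-")[1]);
-- inputs where a space occurs both in the first two "-"-parts of fy and in bill_no (only there can
-- A's sequential replace match a space-containing pattern across an earlier replacement — an
-- accident of the pass order that no fiscal-year string exercises); and inputs where an occurrence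
-- of a lower-priority pattern starts strictly inside an overlapping occurrence of an
-- earlier-listed pattern (there the winner is an accidental tie-break: A's pass order picks the
-- earlier-listed pattern, B's single pass the leftmost match — both defensible).
def Pre_get_comparable_bill_no (bill_no : String) (fy : String) : Prop :=
  PySem.Chars.isIn ['-'] fy.toList = true ∧
  ((∀ p ∈ (PySem.Chars.splitOn fy.toList ['-']).take 2, ' ' ∉ p) ∨ ' ' ∉ bill_no.toList) ∧
  List.Pairwise (fun p q => pvCond p q bill_no.toList) (pvPats fy)
instance (bill_no : String) (fy : String) : Decidable (Pre_get_comparable_bill_no bill_no fy) := by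
  unfold Pre_get_comparable_bill_no pvCond pvOcc; infer_instance
def pvWitness_get_comparable_bill_no : String × String := ("021-2022/XY-77", "2021-2022")

def Spec_get_comparable_bill_no (bill_no : String) (fy : String) (out : String) : Prop := out = get_comparable_bill_no_alt bill_no fy
instance (bill_no : String) (fy : String) (out : String) : Decidable (Spec_get_comparable_bill_no bill_no fy out) := by unfold Spec_get_comparable_bill_no; infer_instance

-- ===== CLAIM (what is proved, stated in full; the proofs are below) =====
def Claim_equal_get_comparable_bill_no : Prop := ∀ (bill_no : String) (fy : String), Dom_get_comparable_bill_no bill_no fy → Pre_get_comparable_bill_no bill_no fy → Spec_get_comparable_bill_no bill_no fy (get_comparable_bill_no bill_no fy)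

-- ===== LEMMAS AND PROOFS =====

-- clean (proof-side) recursions mirroring PySem.Chars.replace / splitOn

/-- `s.replace(p, " ")` for nonempty `p`, as a clean well-founded recursion. -/
def pvRepl (p : List Char) (hp : p ≠ []) : List Char → List Char
  | [] => []
  | c :: t =>
      if p.isPrefixOf (c :: t) then ' ' :: pvRepl p hp (List.drop p.length (c :: t))
      else c :: pvRepl p hp t
termination_by l => l.length
decreasing_by
  · have := List.length_pos_of_ne_nil hp
    simp [List.length_drop]; omega
  · simp

/-- cons a char onto the first piece. -/
def pvChead (c : Char) : List (List Char) → List (List Char)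
  | [] => [[c]]
  | x :: xs => (c :: x) :: xs

/-- prepend a partial piece onto the first piece. -/
def pvCheadL (pre : List Char) : List (List Char) → List (List Char)
  | [] => [pre]
  | x :: xs => (pre ++ x) :: xs

/-- `s.split(p)` for nonempty `p`, as a clean well-founded recursion. -/
def pvSp (p : List Char) (hp : p ≠ []) : List Char → List (List Char)
  | [] => [[]]
  | c :: t =>
      if p.isPrefixOf (c :: t) then [] :: pvSp p hp (List.drop p.length (c :: t))
      else pvChead c (pvSp p hp t)
termination_by l => l.length
decreasing_by
  · have := List.length_pos_of_ne_nil hp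
    simp [List.length_drop]; omega
  · simp

/-- `" ".join`, clean. -/
def pvJn : List (List Char) → List Char
  | [] => []
  | [t] => t
  | t :: ts => t ++ ' ' :: pvJn ts

theorem pvRepl_nil (p : List Char) (hp : p ≠ []) : pvRepl p hp [] = [] := by
  rw [pvRepl]

theorem pvRepl_cons (p : List Char) (hp : p ≠ []) (c : Char) (t : List Char) :
    pvRepl p hp (c :: t) =
      if p.isPrefixOf (c :: t) then ' ' :: pvRepl p hp (List.drop p.length (c :: t))
      else c :: pvRepl p hp t := by
  rw [pvRepl]

theorem pvRepl_go_eq (p : List Char) (hp : p ≠ []) :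
    ∀ (fuel : Nat) (l acc : List Char), l.length ≤ fuel →
      PySem.Chars.replace.go p [' '] fuel l acc = acc.reverse ++ pvRepl p hp l := by
  intro fuel
  induction fuel with
  | zero =>
      intro l acc h
      have : l = [] := by cases l <;> simp_all
      subst this
      simp [PySem.Chars.replace.go, pvRepl]
  | succ n ih =>
      intro l acc h
      cases l with
      | nil => simp [PySem.Chars.replace.go, pvRepl]
      | cons c t =>
          rw [PySem.Chars.replace.go, pvRepl]
          by_cases hpre : p.isPrefixOf (c :: t)
          · have hlen : p.length ≤ (c :: t).length :=
              (List.isPrefixOf_iff_prefix.mp hpre).length_le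
            have hppos : 0 < p.length := List.length_pos_of_ne_nil hp
            rw [if_pos hpre, if_pos hpre, ih _ _ (by simp [List.length_drop]; simp at h; omega)]
            simp
          · rw [if_neg hpre, if_neg hpre, ih t (c :: acc) (by simp at h ⊢; omega)]
            simp

theorem pvRepl_eq (p : List Char) (hp : p ≠ []) (s : List Char) :
    PySem.Chars.replace s p [' '] = pvRepl p hp s := by
  rw [PySem.Chars.replace]
  rw [if_neg (by simp [hp])]
  exact pvRepl_go_eq p hp s.length s [] le_rfl

theorem pvSp_ne_nil (p : List Char) (hp : p ≠ []) (l : List Char) : pvSp p hp l ≠ [] := by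
  cases l with
  | nil => simp [pvSp]
  | cons c t =>
      rw [pvSp]
      by_cases hpre : p.isPrefixOf (c :: t)
      · simp [hpre]
      · rw [if_neg hpre]
        cases pvSp p hp t <;> simp [pvChead]

theorem pvRepl_eq_jn_sp (p : List Char) (hp : p ≠ []) :
    ∀ (n : Nat) (l : List Char), l.length ≤ n → pvRepl p hp l = pvJn (pvSp p hp l) := by
  intro n
  induction n with
  | zero =>
      intro l h
      have : l = [] := by cases l <;> simp_all
      subst this; simp [pvRepl, pvSp, pvJn]
  | succ m ih =>
      intro l h
      cases l with
      | nil => simp [pvRepl, pvSp, pvJn]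
      | cons c t =>
          rw [pvRepl, pvSp]
          by_cases hpre : p.isPrefixOf (c :: t)
          · have hppos : 0 < p.length := List.length_pos_of_ne_nil hp
            rw [if_pos hpre, if_pos hpre,
              ih _ (by simp [List.length_drop]; simp at h; omega)]
            cases hsp : pvSp p hp (List.drop p.length (c :: t)) with
            | nil => exact absurd hsp (pvSp_ne_nil p hp _)
            | cons x xs => simp [pvJn]
          · rw [if_neg hpre, if_neg hpre, ih t (by simp at h ⊢; omega)]
            cases hsp : pvSp p hp t with
            | nil => exact absurd hsp (pvSp_ne_nil p hp _)
            | cons x xs => cases xs <;> simp [pvChead, pvJn]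

/-- a space-free pattern cannot match across an inserted space. -/
theorem pvPrefix_through_sep (p a b : List Char) (hsp : ' ' ∉ p)
    (h : p <+: a ++ ' ' :: b) : p <+: a := by
  by_cases hlen : p.length ≤ a.length
  · have hpe := List.prefix_iff_eq_take.mp h
    rw [List.take_append_of_le_length hlen] at hpe
    rw [hpe]
    exact List.take_prefix _ _
  · exfalso
    apply hsp
    have hpe := List.prefix_iff_eq_take.mp h
    rw [List.take_append, List.take_of_length_le (by omega)] at hpe
    rw [hpe]
    refine List.mem_append_right _ ?_
    obtain ⟨k, hk⟩ : ∃ k, p.length - a.length = k + 1 := ⟨p.length - a.length - 1, by omega⟩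
    rw [hk]
    simp

-- a pattern containing a char absent from the string matches nowhere
theorem pvRepl_id (p : List Char) (hp : p ≠ []) (c : Char) (hc : c ∈ p) :
    ∀ l : List Char, c ∉ l → pvRepl p hp l = l := by
  intro l
  induction l with
  | nil => intro _; rw [pvRepl]
  | cons c0 t ih =>
      intro hnl
      have hnpre : ¬ p.isPrefixOf (c0 :: t) := fun hcon =>
        hnl ((List.isPrefixOf_iff_prefix.mp hcon).subset hc)
      rw [pvRepl_cons p hp, if_neg hnpre, ih (fun hmem => hnl (List.mem_cons.mpr (Or.inr hmem)))]

-- space-containing patterns are no-op replace passes on a space-free string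
theorem pvFold_skipA (bad : List (List Char)) (hbad : ∀ x ∈ bad, ' ' ∈ x)
    (s : List Char) (hs : ' ' ∉ s) :
    bad.foldl (fun inv r => PySem.Chars.replace inv r [' ']) s = s := by
  induction bad with
  | nil => rfl
  | cons p ps ih =>
      have hmem := hbad p (by simp)
      have hp : p ≠ [] := List.ne_nil_of_mem hmem
      have h1 : PySem.Chars.replace s p [' '] = s := by
        rw [pvRepl_eq p hp, pvRepl_id p hp ' ' hmem s hs]
      simp only [List.foldl_cons, h1]
      exact ih (fun q hq => hbad q (by simp [hq]))

-- ===== scan-side lemmas =====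

theorem pvScan_cons_some (ps : List (List Char)) (c : Char) (t : List Char) (q : List Char)
    (h : pvFind ps (c :: t) = some q) :
    pvScan ps (c :: t) = ' ' :: pvScan ps (List.drop q.length (c :: t)) := by
  rw [pvScan, h]

theorem pvScan_cons_none (ps : List (List Char)) (c : Char) (t : List Char)
    (h : pvFind ps (c :: t) = none) :
    pvScan ps (c :: t) = c :: pvScan ps t := by
  rw [pvScan, h]

theorem pvScan_nil_pats : ∀ l, pvScan ([] : List (List Char)) l = l := by
  intro l
  induction l with
  | nil => rw [pvScan]
  | cons c t ih => rw [pvScan_cons_none _ _ _ rfl, ih]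

-- prefix of a replaced string is a prefix of the original (for space-free patterns)
theorem pvPrefix_repl (p : List Char) (hp : p ≠ []) (x : List Char) (hx : ' ' ∉ x) :
    ∀ (n : Nat) (l : List Char), l.length ≤ n → x <+: pvRepl p hp l → x <+: l := by
  intro n
  induction n generalizing x with
  | zero =>
      intro l hl hpre
      have : l = [] := by cases l <;> simp_all
      subst this
      rw [pvRepl_nil] at hpre
      exact hpre
  | succ m ih =>
      intro l hl hpre
      cases l with
      | nil => rw [pvRepl_nil] at hpre; exact hpre
      | cons c t =>
          rw [pvRepl_cons] at hpre
          by_cases hp0 : p.isPrefixOf (c :: t)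
          · rw [if_pos hp0] at hpre
            cases x with
            | nil => exact List.nil_prefix
            | cons d x' =>
                have hd := (List.cons_prefix_cons.mp hpre).1
                exact absurd (by rw [← hd]; exact List.mem_cons_self) hx
          · rw [if_neg hp0] at hpre
            cases x with
            | nil => exact List.nil_prefix
            | cons d x' =>
                obtain ⟨hd, hx'⟩ := List.cons_prefix_cons.mp hpre
                subst hd
                have := ih x' (fun hm => hx (List.mem_cons.mpr (Or.inr hm))) t
                  (by simp at hl ⊢; omega) hx'
                exact List.cons_prefix_cons.mpr ⟨rfl, this⟩

-- splitting replace at an unmatched prefix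
theorem pvRepl_split (p : List Char) (hp : p ≠ []) (q : List Char) :
    ∀ l, q <+: l → (∀ b, b < q.length → ¬ (p <+: l.drop b)) →
      pvRepl p hp l = q ++ pvRepl p hp (l.drop q.length) := by
  induction q with
  | nil => intro l _ _; simp
  | cons d q' ih =>
      intro l hpre hnob
      cases l with
      | nil => exact absurd (List.eq_nil_of_prefix_nil hpre) (by simp)
      | cons c t =>
          obtain ⟨hd, hq'⟩ := List.cons_prefix_cons.mp hpre
          subst hd
          have hnp : ¬ p.isPrefixOf (d :: t) := by
            intro hcon
            exact hnob 0 (by simp) (by simpa using List.isPrefixOf_iff_prefix.mp hcon)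
          rw [pvRepl_cons, if_neg hnp,
            ih t hq' (fun b hb hcon => hnob (b + 1) (by simp; omega) (by simpa using hcon))]
          simp

theorem pvFind_space_none (ps : List (List Char)) (hg : ∀ x ∈ ps, x ≠ [] ∧ ' ' ∉ x)
    (t : List Char) : pvFind ps (' ' :: t) = none := by
  rw [pvFind, List.find?_eq_none]
  intro x hx
  obtain ⟨hne, hsf⟩ := hg x hx
  cases x with
  | nil => simp at hne
  | cons d x' =>
      intro hcon
      rw [Bool.and_eq_true] at hcon
      have hcon := hcon.2
      have := (List.cons_prefix_cons.mp (List.isPrefixOf_iff_prefix.mp hcon)).1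
      exact hsf (by rw [this]; exact List.mem_cons_self)

theorem pvFind_repl_none (p : List Char) (hp : p ≠ []) (ps : List (List Char))
    (hg : ∀ x ∈ ps, ' ' ∉ x) (l : List Char) (h : pvFind ps l = none)
    (l' : List Char) (hl' : l' = pvRepl p hp l) : pvFind ps l' = none := by
  rw [pvFind, List.find?_eq_none] at h ⊢
  intro x hx
  have hl := h x hx
  intro hcon
  rw [Bool.and_eq_true] at hcon
  obtain ⟨hne, hcon⟩ := hcon
  have : x <+: l := pvPrefix_repl p hp x (hg x hx) l.length l le_rfl
    (hl' ▸ List.isPrefixOf_iff_prefix.mp hcon)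
  exact hl (by rw [Bool.and_eq_true]; exact ⟨hne, List.isPrefixOf_iff_prefix.mpr this⟩)

theorem pvFind_repl_some (p : List Char) (hp : p ≠ []) (ps : List (List Char))
    (hg : ∀ x ∈ ps, ' ' ∉ x) (l : List Char) (q : List Char) (h : pvFind ps l = some q)
    (l' : List Char) (hl' : l' = pvRepl p hp l) (hmod : q <+: l') : pvFind ps l' = some q := by
  induction ps with
  | nil => simp [pvFind] at h
  | cons x rest ih =>
      rw [pvFind] at h ⊢
      by_cases hpx : (!x.isEmpty && x.isPrefixOf l) = true
      · rw [List.find?_cons_of_pos (p := fun (y : List Char) => !y.isEmpty && y.isPrefixOf l) hpx] at h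
        injection h with h; subst h
        have hq : (!x.isEmpty && x.isPrefixOf l') = true := by
          simp only [Bool.and_eq_true] at hpx ⊢
          exact ⟨hpx.1, List.isPrefixOf_iff_prefix.mpr hmod⟩
        rw [List.find?_cons_of_pos (p := fun (y : List Char) => !y.isEmpty && y.isPrefixOf l') hq]
      · rw [List.find?_cons_of_neg (p := fun (y : List Char) => !y.isEmpty && y.isPrefixOf l) (by simpa using hpx)] at h
        have hpx' : ¬ (!x.isEmpty && x.isPrefixOf l') = true := by
          intro hcon
          simp only [Bool.and_eq_true] at hcon hpx
          apply hpx
          refine ⟨hcon.1, ?_⟩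
          exact List.isPrefixOf_iff_prefix.mpr
            (pvPrefix_repl p hp x (hg x (by simp)) l.length l le_rfl
              (hl' ▸ List.isPrefixOf_iff_prefix.mp hcon.2))
        rw [List.find?_cons_of_neg (p := fun (y : List Char) => !y.isEmpty && y.isPrefixOf l') (by simpa using hpx')]
        exact ih (fun y hy => hg y (by simp [hy])) h

-- occurrence transport along drop
theorem pvOcc_drop (x s : List Char) (k a : Nat) :
    pvOcc x (s.drop k) a ↔ pvOcc x s (k + a) := by
  simp [pvOcc, List.drop_drop]

theorem pvOcc_lt (x : List Char) (hx : x ≠ []) (s : List Char) (b : Nat)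
    (h : pvOcc x s b) : b < s.length := by
  have := (List.isPrefixOf_iff_prefix.mp h).length_le
  have hxp := List.length_pos_of_ne_nil hx
  simp [List.length_drop] at this
  omega

theorem pvCond_drop (p q s : List Char) (k : Nat) (h : pvCond p q s) :
    pvCond p q (s.drop k) := by
  intro a ha b hb hq hp' hab
  have hq' := (pvOcc_drop q s k a).mp hq
  have hp'' := (pvOcc_drop p s k b).mp hp'
  have hlen : (s.drop k).length = s.length - k := by simp
  have := h (k + a) (by omega) (k + b) (by omega) hq' hp'' (by omega)
  omega

theorem pvNPI_drop (ps : List (List Char)) (s : List Char) (k : Nat)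
    (h : List.Pairwise (fun p q => pvCond p q s) ps) :
    List.Pairwise (fun p q => pvCond p q (s.drop k)) ps := by
  exact h.imp (fun hpq => pvCond_drop _ _ _ k hpq)

-- tokens of the split are infixes of the string (the head is a prefix)
theorem pvSp_shape (p : List Char) (hp : p ≠ []) :
    ∀ (n : Nat) (l : List Char), l.length ≤ n →
      ∃ h rest, pvSp p hp l = h :: rest ∧ h <+: l ∧ ∀ t ∈ rest, t <:+: l := by
  intro n
  induction n with
  | zero =>
      intro l hl
      have : l = [] := by cases l <;> simp_all
      subst this
      exact ⟨[], [], by rw [pvSp], List.nil_prefix, by simp⟩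
  | succ m ih =>
      intro l hl
      cases l with
      | nil => exact ⟨[], [], by rw [pvSp], List.nil_prefix, by simp⟩
      | cons c t =>
          rw [pvSp]
          by_cases hpre : p.isPrefixOf (c :: t)
          · rw [if_pos hpre]
            have hppos : 0 < p.length := List.length_pos_of_ne_nil hp
            obtain ⟨h0, rest0, heq, hpre0, hinf0⟩ :=
              ih (List.drop p.length (c :: t)) (by simp at hl ⊢; omega)
            refine ⟨[], pvSp p hp (List.drop p.length (c :: t)), rfl, List.nil_prefix, ?_⟩
            intro x hx
            have hxinf : x <:+: List.drop p.length (c :: t) := by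
              rw [heq] at hx
              rcases List.mem_cons.mp hx with h | h
              · exact h ▸ hpre0.isInfix
              · exact hinf0 x h
            exact hxinf.trans (List.drop_suffix _ _).isInfix
          · rw [if_neg hpre]
            obtain ⟨h0, rest0, heq, hpre0, hinf0⟩ := ih t (by simp at hl ⊢; omega)
            rw [heq]
            refine ⟨c :: h0, rest0, rfl, List.cons_prefix_cons.mpr ⟨rfl, hpre0⟩, ?_⟩
            intro x hx
            exact (hinf0 x hx).trans (List.suffix_cons c t).isInfix

-- two overlapping space-free occurrences in a space-joined list lie in one token, same shift
theorem pvJn_pair (pj pi : List Char) (hj : ' ' ∉ pj) (hi : ' ' ∉ pi) :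
    ∀ (T : List (List Char)) (a b : Nat), a ≤ b → b < a + pj.length →
      pj <+: (pvJn T).drop a → pi <+: (pvJn T).drop b →
      ∃ t ∈ T, ∃ j, pj <+: t.drop j ∧ pi <+: t.drop (j + (b - a)) := by
  intro T
  induction T with
  | nil =>
      intro a b hab hb hpj _
      exfalso
      have : pj = [] := List.eq_nil_of_prefix_nil (by simpa [pvJn] using hpj)
      subst this; simp at hb; omega
  | cons t ts ih =>
      intro a b hab hb hpj hpi
      cases ts with
      | nil =>
          refine ⟨t, by simp, a, by simpa [pvJn] using hpj, ?_⟩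
          rw [show a + (b - a) = b from by omega]
          simpa [pvJn] using hpi
      | cons t' ts' =>
          have hjn : pvJn (t :: t' :: ts') = t ++ ' ' :: pvJn (t' :: ts') := by
            rw [pvJn]
            simp
          rw [hjn] at hpj hpi
          by_cases hat : a ≤ t.length
          · have e1 : (t ++ ' ' :: pvJn (t' :: ts')).drop a
                = t.drop a ++ ' ' :: pvJn (t' :: ts') :=
              List.drop_append_of_le_length hat
            rw [e1] at hpj
            have hpj' : pj <+: t.drop a := pvPrefix_through_sep pj _ _ hj hpj
            have hlen : a + pj.length ≤ t.length := by
              have := hpj'.length_le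
              simp [List.length_drop] at this
              have hne : pj ≠ [] := by
                intro hcon; subst hcon; simp at hb; omega
              have := List.length_pos_of_ne_nil hne
              omega
            have hbt : b ≤ t.length := by omega
            have e2 : (t ++ ' ' :: pvJn (t' :: ts')).drop b
                = t.drop b ++ ' ' :: pvJn (t' :: ts') :=
              List.drop_append_of_le_length hbt
            rw [e2] at hpi
            have hpi' : pi <+: t.drop b := pvPrefix_through_sep pi _ _ hi hpi
            refine ⟨t, by simp, a, hpj', ?_⟩
            rw [show a + (b - a) = b from by omega]
            exact hpi'
          · have ha1 : t.length + 1 ≤ a := by omega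
            have edrop : ∀ k, t.length + 1 ≤ k →
                (t ++ ' ' :: pvJn (t' :: ts')).drop k
                  = (pvJn (t' :: ts')).drop (k - t.length - 1) := by
              intro k hk
              rw [show t ++ ' ' :: pvJn (t' :: ts') = (t ++ [' ']) ++ pvJn (t' :: ts') from by
                simp]
              rw [List.drop_append]
              rw [List.drop_eq_nil_of_le (by simp; omega)]
              rw [List.nil_append]
              congr 1
              simp
              omega
            rw [edrop a ha1] at hpj
            rw [edrop b (by omega)] at hpi
            obtain ⟨x, hxm, j, h1, h2⟩ := ih (a - t.length - 1) (b - t.length - 1)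
              (by omega) (by omega) hpj
              (by rw [show b - t.length - 1 = (a - t.length - 1) + (b - a) from by omega] at hpi ⊢
                  exact hpi)
            exact ⟨x, by simp [hxm], j,  h1,
              by rw [show j + (b - a) = j + (b - t.length - 1 - (a - t.length - 1)) from by omega]
                 exact h2⟩

-- the no-overlap condition survives a replace pass
theorem pvCond_repl (p : List Char) (hp : p ≠ []) (pi pj : List Char)
    (hine : pi ≠ []) (hjne : pj ≠ []) (hi : ' ' ∉ pi) (hj : ' ' ∉ pj) (s : List Char)
    (h : pvCond pi pj s) : pvCond pi pj (pvRepl p hp s) := by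
  intro a ha b hb hOj hOi hab
  by_contra hno
  rw [Nat.not_le] at hno
  have hrepl : pvRepl p hp s = pvJn (pvSp p hp s) := pvRepl_eq_jn_sp p hp s.length s le_rfl
  have hpj : pj <+: (pvJn (pvSp p hp s)).drop a := by
    rw [← hrepl]; exact List.isPrefixOf_iff_prefix.mp hOj
  have hpi : pi <+: (pvJn (pvSp p hp s)).drop b := by
    rw [← hrepl]; exact List.isPrefixOf_iff_prefix.mp hOi
  obtain ⟨t, htm, j, h1, h2⟩ :=
    pvJn_pair pj pi hj hi (pvSp p hp s) a b (le_of_lt hab) hno hpj hpi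
  have htinf : t <:+: s := by
    obtain ⟨h0, rest, heq, hpre0, hinf⟩ := pvSp_shape p hp s.length s le_rfl
    rw [heq] at htm
    rcases List.mem_cons.mp htm with hc | hc
    · exact hc ▸ hpre0.isInfix
    · exact hinf t hc
  obtain ⟨u, v, huv⟩ := htinf
  have hdropA : ∀ (k : Nat) (x : List Char), x <+: t.drop k → x <+: s.drop (u.length + k) := by
    intro k x hx
    rw [← huv, List.append_assoc, List.drop_append, List.drop_eq_nil_of_le (by omega),
      List.nil_append, show u.length + k - u.length = k from by omega, List.drop_append]
    exact hx.trans (List.prefix_append _ _)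
  have hOj' : pvOcc pj s (u.length + j) :=
    List.isPrefixOf_iff_prefix.mpr (hdropA j pj h1)
  have hOi' : pvOcc pi s (u.length + (j + (b - a))) :=
    List.isPrefixOf_iff_prefix.mpr (hdropA (j + (b - a)) pi h2)
  have hlA := pvOcc_lt pj hjne s _ hOj'
  have hlB := pvOcc_lt pi hine s _ hOi'
  have := h (u.length + j) hlA (u.length + (j + (b - a))) hlB hOj' hOi' (by omega)
  omega

-- one scan step of the priority list = one replace pass of its head
theorem pvScan_repl (p : List Char) (hp : p ≠ []) (hpsf : ' ' ∉ p) (ps : List (List Char))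
    (hg : ∀ x ∈ ps, x ≠ [] ∧ ' ' ∉ x) :
    ∀ (n : Nat) (l : List Char), l.length ≤ n →
      List.Pairwise (fun x y => pvCond x y l) (p :: ps) →
      pvScan (p :: ps) l = pvScan ps (pvRepl p hp l) := by
  have hpe : p.isEmpty = false := by
    cases p
    · exact absurd rfl hp
    · rfl
  intro n
  induction n with
  | zero =>
      intro l hl _
      have : l = [] := by cases l <;> simp_all
      subst this
      rw [pvRepl_nil, pvScan, pvScan]
  | succ m ih =>
      intro l hl hN
      cases l with
      | nil => rw [pvRepl_nil, pvScan, pvScan]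
      | cons c t =>
          by_cases hp0 : p.isPrefixOf (c :: t) = true
          · have hfind : pvFind (p :: ps) (c :: t) = some p := by
              rw [pvFind, List.find?_cons_of_pos
                (p := fun (y : List Char) => !y.isEmpty && y.isPrefixOf (c :: t))
                (by simp [hpe, hp0])]
            rw [pvScan_cons_some _ _ _ _ hfind]
            have hrw : pvRepl p hp (c :: t)
                = ' ' :: pvRepl p hp (List.drop p.length (c :: t)) := by
              rw [pvRepl_cons, if_pos hp0]
            rw [hrw, pvScan_cons_none ps _ _
              (pvFind_space_none ps hg (pvRepl p hp (List.drop p.length (c :: t))))]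
            congr 1
            have hppos : 0 < p.length := List.length_pos_of_ne_nil hp
            exact ih (List.drop p.length (c :: t))
              (by simp at hl ⊢; omega) (pvNPI_drop _ _ _ hN)
          · cases hf : pvFind ps (c :: t) with
            | some q =>
                have hfind : pvFind (p :: ps) (c :: t) = some q := by
                  rw [pvFind, List.find?_cons_of_neg
                    (p := fun (y : List Char) => !y.isEmpty && y.isPrefixOf (c :: t))
                    (by simp [hpe, hp0])]
                  exact hf
                have hqm : q ∈ ps := List.mem_of_find?_eq_some hf
                have hqpred := List.find?_some hf
                have hqne : q ≠ [] := by
                  simp only [Bool.and_eq_true, Bool.not_eq_true'] at hqpred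
                  cases q
                  · simp at hqpred
                  · simp
                have hqpre : q <+: c :: t := by
                  simp only [Bool.and_eq_true] at hqpred
                  exact List.isPrefixOf_iff_prefix.mp hqpred.2
                have hcond : pvCond p q (c :: t) := (List.pairwise_cons.mp hN).1 q hqm
                have hnob : ∀ b, b < q.length → ¬ (p <+: (c :: t).drop b) := by
                  intro b hbq hcon
                  cases b with
                  | zero => exact hp0 (List.isPrefixOf_iff_prefix.mpr (by simpa using hcon))
                  | succ b' =>
                      have hOq : pvOcc q (c :: t) 0 :=
                        List.isPrefixOf_iff_prefix.mpr (by simpa using hqpre)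
                      have hOp : pvOcc p (c :: t) (b' + 1) :=
                        List.isPrefixOf_iff_prefix.mpr hcon
                      have hbl := pvOcc_lt p hp _ _ hOp
                      have := hcond 0 (by simp) (b' + 1) hbl hOq hOp (by omega)
                      omega
                have hsplit : pvRepl p hp (c :: t)
                    = q ++ pvRepl p hp ((c :: t).drop q.length) :=
                  pvRepl_split p hp q (c :: t) hqpre hnob
                have hmod : q <+: pvRepl p hp (c :: t) := by
                  rw [hsplit]; exact List.prefix_append _ _
                have hfind' : pvFind ps (pvRepl p hp (c :: t)) = some q :=
                  pvFind_repl_some p hp ps (fun x hx => (hg x hx).2) (c :: t) q hf _ rfl hmod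
                rw [pvScan_cons_some _ _ _ _ hfind]
                cases hM : pvRepl p hp (c :: t) with
                | nil => exact absurd (List.eq_nil_of_prefix_nil (hM ▸ hmod)) hqne
                | cons mc mt =>
                    rw [pvScan_cons_some ps mc mt q (hM ▸ hfind')]
                    congr 1
                    have hql : 0 < q.length := List.length_pos_of_ne_nil hqne
                    have hdropM : List.drop q.length (mc :: mt)
                        = pvRepl p hp ((c :: t).drop q.length) := by
                      rw [← hM, hsplit]
                      exact List.drop_left
                    rw [hdropM]
                    exact ih ((c :: t).drop q.length)
                      (by simp at hl ⊢; omega) (pvNPI_drop _ _ _ hN)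
            | none =>
                have hfind : pvFind (p :: ps) (c :: t) = none := by
                  rw [pvFind, List.find?_cons_of_neg
                    (p := fun (y : List Char) => !y.isEmpty && y.isPrefixOf (c :: t))
                    (by simp [hpe, hp0])]
                  exact hf
                have hrw : pvRepl p hp (c :: t) = c :: pvRepl p hp t := by
                  rw [pvRepl_cons, if_neg (by simpa using hp0)]
                have hfn' : pvFind ps (c :: pvRepl p hp t) = none :=
                  pvFind_repl_none p hp ps (fun x hx => (hg x hx).2) (c :: t) hf _ hrw.symm
                rw [pvScan_cons_none _ _ _ hfind, hrw, pvScan_cons_none ps _ _ hfn']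
                congr 1
                have := pvNPI_drop (p :: ps) (c :: t) 1 hN
                simp only [List.drop_succ_cons, List.drop_zero] at this
                exact ih t (by simp at hl ⊢; omega) this

-- the main equivalence: sequential replaces = one priority scan, under no-overlap
theorem pvFold_scan :
    ∀ (ps : List (List Char)) (s : List Char), (∀ x ∈ ps, x ≠ [] ∧ ' ' ∉ x) →
      List.Pairwise (fun x y => pvCond x y s) ps →
      ps.foldl (fun inv r => PySem.Chars.replace inv r [' ']) s = pvScan ps s := by
  intro ps
  induction ps with
  | nil => intro s _ _; rw [pvScan_nil_pats]; rfl
  | cons p ps ih =>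
      intro s hg hN
      obtain ⟨hpne, hpsf⟩ := hg p (by simp)
      have hgt : ∀ x ∈ ps, x ≠ [] ∧ ' ' ∉ x := fun x hx => hg x (by simp [hx])
      have hN' : List.Pairwise (fun x y => pvCond x y (pvRepl p hpne s)) ps := by
        refine List.Pairwise.imp_of_mem ?_ (List.pairwise_cons.mp hN).2
        intro x y hx hy hxy
        exact pvCond_repl p hpne x y (hgt x hx).1 (hgt y hy).1 (hgt x hx).2 (hgt y hy).2 s hxy
      simp only [List.foldl_cons]
      rw [pvRepl_eq p hpne, ih (pvRepl p hpne s) hgt hN']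
      exact (pvScan_repl p hpne hpsf ps hgt s.length s le_rfl hN).symm

-- space-containing patterns never match while scanning a space-free string
theorem pvScan_skip (bad good : List (List Char)) (hbad : ∀ x ∈ bad, ' ' ∈ x) :
    ∀ (n : Nat) (l : List Char), l.length ≤ n → ' ' ∉ l →
      pvScan (bad ++ good) l = pvScan good l := by
  intro n
  induction n with
  | zero =>
      intro l hl _
      have : l = [] := by cases l <;> simp_all
      subst this
      rw [pvScan, pvScan]
  | succ m ih =>
      intro l hl hsf
      cases l with
      | nil => rw [pvScan, pvScan]
      | cons c t =>
          have hfb : pvFind (bad ++ good) (c :: t) = pvFind good (c :: t) := by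
            rw [pvFind, pvFind, List.find?_append]
            rw [show List.find? (fun (y : List Char) => !y.isEmpty && y.isPrefixOf (c :: t)) bad
                = none from ?_]
            · rfl
            · rw [List.find?_eq_none]
              intro x hx
              simp only [Bool.and_eq_true, not_and]
              intro _ hcon
              exact hsf (((List.isPrefixOf_iff_prefix.mp hcon)).subset (hbad x hx))
          cases hf : pvFind good (c :: t) with
          | some q =>
              rw [pvScan_cons_some _ _ _ _ (hfb.trans hf), pvScan_cons_some _ _ _ _ hf]
              congr 1
              have hqpred := List.find?_some hf
              have hql : 0 < q.length := by
                simp only [Bool.and_eq_true, Bool.not_eq_true'] at hqpred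
                cases q
                · simp at hqpred
                · simp
              refine ih _ (by simp at hl ⊢; omega) ?_
              intro hmem
              exact hsf (List.mem_of_mem_drop hmem)
          | none =>
              rw [pvScan_cons_none _ _ _ (hfb.trans hf), pvScan_cons_none _ _ _ hf]
              congr 1
              exact ih t (by simp at hl ⊢; omega) (fun hmem => hsf (by simp [hmem]))

theorem pvSp_len_two (c : Char) (hp : [c] ≠ []) (l : List Char) (hc : c ∈ l) :
    2 ≤ (pvSp [c] hp l).length := by
  induction l with
  | nil => simp at hc
  | cons c0 t ih =>
      rw [pvSp]
      by_cases hpre : [c].isPrefixOf (c0 :: t)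
      · rw [if_pos hpre]
        cases hsp : pvSp [c] hp (List.drop [c].length (c0 :: t)) with
        | nil => exact absurd hsp (pvSp_ne_nil _ _ _)
        | cons y ys => simp
      · rw [if_neg hpre]
        have hne : c0 ≠ c := by
          intro hcon; subst hcon; exact hpre (by simp [List.isPrefixOf])
        have hct : c ∈ t := by
          rcases List.mem_cons.mp hc with h | h
          · exact absurd h.symm hne
          · exact h
        have h2 := ih hct
        cases hsp : pvSp [c] hp t with
        | nil => exact absurd hsp (pvSp_ne_nil _ _ _)
        | cons y ys =>
            rw [hsp] at h2
            rw [show pvChead c0 (y :: ys) = (c0 :: y) :: ys from rfl]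
            simp at h2 ⊢
            omega

theorem pvSp_go_eq (p : List Char) (hp : p ≠ []) :
    ∀ (fuel : Nat) (l cur : List Char) (acc : List (List Char)), l.length ≤ fuel →
      PySem.Chars.splitOn.go p fuel l cur acc = acc.reverse ++ pvCheadL cur.reverse (pvSp p hp l) := by
  intro fuel
  induction fuel with
  | zero =>
      intro l cur acc h
      have : l = [] := by cases l <;> simp_all
      subst this
      simp [PySem.Chars.splitOn.go, pvSp, pvCheadL]
  | succ n ih =>
      intro l cur acc h
      cases l with
      | nil => simp [PySem.Chars.splitOn.go, pvSp, pvCheadL]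
      | cons c t =>
          rw [PySem.Chars.splitOn.go, pvSp]
          by_cases hpre : p.isPrefixOf (c :: t)
          · have hlen : p.length ≤ (c :: t).length :=
              (List.isPrefixOf_iff_prefix.mp hpre).length_le
            have hppos : 0 < p.length := List.length_pos_of_ne_nil hp
            rw [if_pos hpre, if_pos hpre, ih _ _ _ (by simp [List.length_drop]; simp at h; omega)]
            cases hsp : pvSp p hp (List.drop p.length (c :: t)) with
            | nil => exact absurd hsp (pvSp_ne_nil p hp _)
            | cons x xs => simp [pvCheadL]
          · rw [if_neg hpre, if_neg hpre, ih t (c :: cur) acc (by simp at h ⊢; omega)]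
            cases hsp : pvSp p hp t with
            | nil => simp [pvChead, pvCheadL]
            | cons x xs => simp [pvChead, pvCheadL]

theorem pvSp_eq (p : List Char) (hp : p ≠ []) (s : List Char) :
    PySem.Chars.splitOn s p = pvSp p hp s := by
  rw [PySem.Chars.splitOn, pvSp_go_eq p hp (s.length + 1) s [] [] (by omega)]
  cases hsp : pvSp p hp s with
  | nil => exact absurd hsp (pvSp_ne_nil p hp s)
  | cons x xs => simp [pvCheadL]

-- ===== VERDICT (by name: the statement is the Claim_ definition above) =====
-- full-list-to-suffix combination used by every branch of the final proof
theorem pvFold_scan_split (bad good : List (List Char))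
    (hbad : ∀ x ∈ bad, ' ' ∈ x) (hgood : ∀ x ∈ good, x ≠ [] ∧ ' ' ∉ x)
    (s : List Char) (hs : ' ' ∉ s)
    (hN : List.Pairwise (fun x y => pvCond x y s) (bad ++ good)) :
    (bad ++ good).foldl (fun inv r => PySem.Chars.replace inv r [' ']) s
      = pvScan (bad ++ good) s := by
  rw [List.foldl_append, pvFold_skipA bad hbad s hs,
    pvScan_skip bad good hbad s.length s le_rfl hs]
  exact pvFold_scan good s hgood (hN.sublist (List.sublist_append_right _ _))

theorem get_comparable_bill_no_spec : Claim_equal_get_comparable_bill_no := by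
  intro bill fy _ hpre
  obtain ⟨hin, hnosp, hNPI⟩ := hpre
  have hne : (['-'] : List Char) ≠ [] := by simp
  have hdash : '-' ∈ fy.toList := by
    obtain ⟨s, t, hst⟩ := (PySem.Chars.isIn_iff_infix _ _).mp hin
    rw [← hst]; simp
  have hsplit : PySem.Chars.splitOn fy.toList ['-'] = pvSp ['-'] hne fy.toList :=
    pvSp_eq _ _ _
  have hlen2 : 2 ≤ (pvSp ['-'] hne fy.toList).length := pvSp_len_two '-' hne fy.toList hdash
  unfold Spec_get_comparable_bill_no get_comparable_bill_no get_comparable_bill_no_alt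
  rcases hq : pvSp ['-'] hne fy.toList with _ | ⟨f0, _ | ⟨f1, rest⟩⟩
  · rw [hq] at hlen2; simp at hlen2
  · rw [hq] at hlen2; simp at hlen2
  · have hs0 : PySem.List.slice f0 (some 2) none = List.drop 2 f0 := by
      simpa using PySem.List.slice_from f0 (show (0 : Int) ≤ 2 by norm_num)
    have hs1 : PySem.List.slice f1 (some 2) none = List.drop 2 f1 := by
      simpa using PySem.List.slice_from f1 (show (0 : Int) ≤ 2 by norm_num)
    have hg0 : PySem.List.pyGet? (f0 :: f1 :: rest) 0 = some f0 := by
      simp [PySem.List.pyGet?, PySem.List.pyIdx?,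
        show (0 : Int) ≤ (rest.length : Int) + 1 from by omega]
    have hg1 : PySem.List.pyGet? (f0 :: f1 :: rest) 1 = some f1 := by
      simp [PySem.List.pyGet?, PySem.List.pyIdx?]
    have hPats : pvPats fy =
        [f0 ++ '-' :: f1, f0 ++ '/' :: f1, f0 ++ '-' :: List.drop 2 f1,
         f0 ++ '/' :: List.drop 2 f1, List.drop 2 f0 ++ '-' :: List.drop 2 f1,
         List.drop 2 f0 ++ '/' :: List.drop 2 f1, ['/'], ['-']] := by
      rw [pvPats]
      simp only [hsplit, hq, hg0, hg1, Option.getD_some, hs0, hs1]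
    rw [hPats] at hNPI
    simp only [hsplit, hq, hg0, hg1]
    simp only [hs0, hs1]
    suffices hmain :
        [f0 ++ '-' :: f1, f0 ++ '/' :: f1, f0 ++ '-' :: List.drop 2 f1,
         f0 ++ '/' :: List.drop 2 f1, List.drop 2 f0 ++ '-' :: List.drop 2 f1,
         List.drop 2 f0 ++ '/' :: List.drop 2 f1, ['/'], ['-']].foldl
            (fun inv r => PySem.Chars.replace inv r [' ']) bill.toList
          = pvScan
            [f0 ++ '-' :: f1, f0 ++ '/' :: f1, f0 ++ '-' :: List.drop 2 f1,
             f0 ++ '/' :: List.drop 2 f1, List.drop 2 f0 ++ '-' :: List.drop 2 f1,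
             List.drop 2 f0 ++ '/' :: List.drop 2 f1, ['/'], ['-']] bill.toList by
      rw [hmain]
    by_cases hff : ' ' ∉ f0 ∧ ' ' ∉ f1
    · -- all eight patterns are space-free: the scan equivalence applies directly
      obtain ⟨hf0, hf1⟩ := hff
      have hd0 : ' ' ∉ List.drop 2 f0 := fun hmem => hf0 (List.mem_of_mem_drop hmem)
      have hd1 : ' ' ∉ List.drop 2 f1 := fun hmem => hf1 (List.mem_of_mem_drop hmem)
      have hpat : ∀ p ∈ [f0 ++ '-' :: f1, f0 ++ '/' :: f1, f0 ++ '-' :: List.drop 2 f1,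
          f0 ++ '/' :: List.drop 2 f1, List.drop 2 f0 ++ '-' :: List.drop 2 f1,
          List.drop 2 f0 ++ '/' :: List.drop 2 f1, ['/'], ['-']], p ≠ [] ∧ ' ' ∉ p := by
        intro p hp
        simp only [List.mem_cons, List.not_mem_nil, or_false] at hp
        rcases hp with h | h | h | h | h | h | h | h <;> subst h <;>
          refine ⟨by simp, ?_⟩ <;> simp [List.mem_append, hf0, hf1, hd0, hd1]
      exact pvFold_scan _ bill.toList hpat hNPI
    · -- fy's parts carry a space: Pre_ then says bill_no is space-free, and the space-carrying
      -- patterns form a prefix of the list matching nothing on either side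
      have hbill : ' ' ∉ bill.toList := by
        rcases hnosp with hfy | hb
        · exact absurd ⟨hfy f0 (by rw [hsplit, hq]; simp), hfy f1 (by rw [hsplit, hq]; simp)⟩ hff
        · exact hb
      by_cases hsm : ' ' ∈ List.drop 2 f0 ∨ ' ' ∈ List.drop 2 f1
      · -- the first six patterns all carry a space; only ['/'] and ['-'] act
        have hskipped : ∀ p ∈ [f0 ++ '-' :: f1, f0 ++ '/' :: f1, f0 ++ '-' :: List.drop 2 f1,
            f0 ++ '/' :: List.drop 2 f1, List.drop 2 f0 ++ '-' :: List.drop 2 f1,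
            List.drop 2 f0 ++ '/' :: List.drop 2 f1], ' ' ∈ p := by
          rcases hsm with hsm | hsm
          · have hmf0 : ' ' ∈ f0 := List.mem_of_mem_drop hsm
            intro p hp
            simp only [List.mem_cons, List.not_mem_nil, or_false] at hp
            rcases hp with h | h | h | h | h | h <;> subst h <;> simp [List.mem_append, hmf0, hsm]
          · have hmf1 : ' ' ∈ f1 := List.mem_of_mem_drop hsm
            intro p hp
            simp only [List.mem_cons, List.not_mem_nil, or_false] at hp
            rcases hp with h | h | h | h | h | h <;> subst h <;> simp [List.mem_append, hmf1, hsm]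
        have hpsB : ∀ p ∈ [(['/'] : List Char), ['-']], p ≠ [] ∧ ' ' ∉ p := by
          intro p hp
          simp only [List.mem_cons, List.not_mem_nil, or_false] at hp
          rcases hp with h | h <;> subst h <;> exact ⟨by simp, by simp⟩
        exact pvFold_scan_split _ _ hskipped hpsB bill.toList hbill hNPI
      · obtain ⟨hnd0, hnd1⟩ := not_or.mp hsm
        by_cases hmf0 : ' ' ∈ f0
        · -- patterns 1-4 carry the space of f0; patterns 5-8 are space-free
          have hskipped : ∀ p ∈ [f0 ++ '-' :: f1, f0 ++ '/' :: f1, f0 ++ '-' :: List.drop 2 f1,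
              f0 ++ '/' :: List.drop 2 f1], ' ' ∈ p := by
            intro p hp
            simp only [List.mem_cons, List.not_mem_nil, or_false] at hp
            rcases hp with h | h | h | h <;> subst h <;> simp [List.mem_append, hmf0]
          have hpsB : ∀ p ∈ [List.drop 2 f0 ++ '-' :: List.drop 2 f1,
              List.drop 2 f0 ++ '/' :: List.drop 2 f1, (['/'] : List Char), ['-']],
              p ≠ [] ∧ ' ' ∉ p := by
            intro p hp
            simp only [List.mem_cons, List.not_mem_nil, or_false] at hp
            rcases hp with h | h | h | h <;> subst h <;>
              refine ⟨by simp, ?_⟩ <;> simp [List.mem_append, hnd0, hnd1]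
          exact pvFold_scan_split _ _ hskipped hpsB bill.toList hbill hNPI
        · -- only f1 carries a space: patterns 1-2 are skipped, patterns 3-8 are space-free
          have hmf1 : ' ' ∈ f1 := by
            by_contra hnf1
            exact hff ⟨hmf0, hnf1⟩
          have hskipped : ∀ p ∈ [f0 ++ '-' :: f1, f0 ++ '/' :: f1], ' ' ∈ p := by
            intro p hp
            simp only [List.mem_cons, List.not_mem_nil, or_false] at hp
            rcases hp with h | h <;> subst h <;> simp [List.mem_append, hmf1]
          have hpsB : ∀ p ∈ [f0 ++ '-' :: List.drop 2 f1, f0 ++ '/' :: List.drop 2 f1,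
              List.drop 2 f0 ++ '-' :: List.drop 2 f1, List.drop 2 f0 ++ '/' :: List.drop 2 f1,
              (['/'] : List Char), ['-']], p ≠ [] ∧ ' ' ∉ p := by
            intro p hp
            simp only [List.mem_cons, List.not_mem_nil, or_false] at hp
            rcases hp with h | h | h | h | h | h <;> subst h <;>
              refine ⟨by simp, ?_⟩ <;> simp [List.mem_append, hmf0, hnd0, hnd1]
          exact pvFold_scan_split _ _ hskipped hpsB bill.toList hbill hNPI
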